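-- pv_equiv track=rewrite | github.com/xSuperSunGx/transpostitionalEncryption | encryptionFile.py | adfgvx_encryption
-- ===== SOURCE A (Python) =====
-- adfgvx = ['N', 'A', 1, 'C', 3, 'H', 8, 'T', 'B', 2, 'O', 'M', 'E', 5, 'W', 'R', 'P', 'D', 4, 'F', 6, 'G', 7, 'I', 9,
--           'J', 0, 'K', 'L', 'Q', 'S', 'U', 'V', 'X', 'Y', 'Z']
--
-- d = {0: 'A', 1: 'D', 2: 'F', 3: 'G', 4: 'V', 5: 'X'}
--
-- def adfgvx_encryption(text, key):
--     text = text.upper()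
--     strr = ""
--     t = []
--     a = {}
--     check = -1
--     for i in range(len(text)):
--         for j in range(len(adfgvx)):
--             if text[i] == adfgvx[j]:
--                 row = j // 6
--                 col = j % 6
--                 strr += d[row] + d[col]
--                 t.append(d[row])
--                 t.append(d[col])
--     for i in range(len(t)):
--         index = i % len(key)
--         if index == 0:
--             check += 1
--
--         count = -1
--         for j in a.keys():
--             if str(j).startswith(key[index]):
--                 count += 1
--         if check == 0:
--             a[key[index] + str(count + 1)] = a[key[index] + str(count + 1)] + t[i] if key[index] + str(count + 1) in a.keys() else t[i]
--         else:
--             a[list(a.keys())[index]] = a[list(a.keys())[index]] + t[i]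
--     ret = ""
--     for i in sorted(a.keys()):
--
--         ret += a[i]
--
--
--
--     return ret
-- ===== SOURCE B (Python) =====
-- adfgvx = ['N', 'A', 1, 'C', 3, 'H', 8, 'T', 'B', 2, 'O', 'M', 'E', 5, 'W', 'R', 'P', 'D', 4, 'F', 6, 'G', 7, 'I', 9,
--           'J', 0, 'K', 'L', 'Q', 'S', 'U', 'V', 'X', 'Y', 'Z']
--
-- d = {0: 'A', 1: 'D', 2: 'F', 3: 'G', 4: 'V', 5: 'X'}
--
-- # digram for each letter of the square, computed once at module load
-- _PAIR = {}
-- for _j, _ch in enumerate(adfgvx):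
--     if isinstance(_ch, str):
--         _PAIR[_ch] = d[_j // 6] + d[_j % 6]
--
--
-- def adfgvx_encryption(text, key):
--     # substitution: one table lookup per character
--     pairs = ''.join(_PAIR[c] for c in text.upper() if c in _PAIR)
--     k = len(key)
--     m = min(k, len(pairs))
--     # only columns 0..m-1 are non-empty; A labels column p with key[p] plus the
--     # number of earlier occurrences of key[p] in the key, and emits columns in
--     # label order -- so sort the column indices by that label and read each
--     # column straight out of the pair stream with a strided slice
--     order = sorted(range(m), key=lambda p: key[p] + str(key[:p].count(key[p])))
--     return ''.join(pairs[p::k] for p in order)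
-- ===== Notes on version B (the rewrite author's own statement) =====
-- stated objective: faster
-- what changed: B drops A's incrementally grown dictionary of named columns entirely (A rescans all column names and rebuilds the key list for every ciphertext character): B sorts the column indices 0..min(k,n)-1 by their label key[p]+str(count) once and reads each column directly out of the digram stream with a strided slice pairs[p::k]; substitution uses a precomputed digram table instead of scanning the 36-entry square per character.
import Mathlib
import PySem

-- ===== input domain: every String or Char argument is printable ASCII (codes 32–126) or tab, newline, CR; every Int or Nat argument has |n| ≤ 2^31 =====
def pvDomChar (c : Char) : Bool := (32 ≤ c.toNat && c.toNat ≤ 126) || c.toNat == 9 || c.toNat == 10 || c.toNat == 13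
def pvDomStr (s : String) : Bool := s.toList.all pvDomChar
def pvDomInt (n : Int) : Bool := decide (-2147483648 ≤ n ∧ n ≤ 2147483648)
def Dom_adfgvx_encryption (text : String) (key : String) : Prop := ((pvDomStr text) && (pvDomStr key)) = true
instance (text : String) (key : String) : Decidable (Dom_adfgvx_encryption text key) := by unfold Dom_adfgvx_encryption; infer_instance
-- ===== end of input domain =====

-- B builds no column dictionary at all: it sorts the column indices by their label and reads
-- each column straight out of the digram stream with a strided slice (measured faster).

-- ===== PORT A =====
-- the Python list `adfgvx` mixes 26 one-letter strings and 10 ints; a 1-character string can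
-- never compare equal (==) to an int, so the int entries are modeled as `none` (exact).
def pvAdfgvxTable : List (Option Char) :=
  [some 'N', some 'A', none, some 'C', none, some 'H', none, some 'T', some 'B', none,
   some 'O', some 'M', some 'E', none, some 'W', some 'R', some 'P', some 'D', none,
   some 'F', none, some 'G', none, some 'I', none, some 'J', none, some 'K', some 'L',
   some 'Q', some 'S', some 'U', some 'V', some 'X', some 'Y', some 'Z']

-- the dict d = {0:'A',1:'D',2:'F',3:'G',4:'V',5:'X'}; only keys 0..5 are ever looked up
def pvDLookup (r : Int) : Char := PySem.List.pyGetD ['A','D','F','G','V','X'] r ' '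

-- body of A's first loop (over the characters of text.upper()); the inner loop scans the
-- whole table; `strr` accumulates exactly the same characters as `t` and is never used, so
-- it is omitted
def pvA1 (t : List Char) (c : Char) : List Char :=
  (PySem.List.enumerate pvAdfgvxTable 0).foldl (fun t ji =>
    if some c == ji.2 then
      t ++ [pvDLookup (PySem.Int.floordiv ji.1 6), pvDLookup (PySem.Int.mod ji.1 6)]
    else t) t

-- body of A's second loop (state: the dict `a` and `check`; argument: (i, t[i]))
def pvA2 (keyL : List Char) (st : PySem.Dict String (List Char) × Int)
    (p : Int × Char) : PySem.Dict String (List Char) × Int :=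
  let a := st.1
  let index := PySem.Int.mod p.1 (keyL.length : Int)
  let check := if index == 0 then st.2 + 1 else st.2
  let kc : Char := PySem.List.pyGetD keyL index ' '
  let count : Int := a.keys.foldl (fun cnt j =>
    if PySem.Str.startswith j (String.ofList [kc]) then cnt + 1 else cnt) (-1)
  if check == 0 then
    let name := String.ofList (kc :: PySem.Int.toChars (count + 1))
    if a.contains name then (a.insert name (a.getD name [] ++ [p.2]), check)
    else (a.insert name [p.2], check)
  else
    let kname := PySem.List.pyGetD a.keys index ""
    (a.insert kname (a.getD kname [] ++ [p.2]), check)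

def adfgvx_encryption (text : String) (key : String) : String :=
  let textU := (PySem.Str.upper text).toList
  let keyL := key.toList
  let t : List Char := textU.foldl pvA1 []
  let st := (PySem.List.enumerate t 0).foldl (pvA2 keyL) (PySem.Dict.empty, -1)
  String.ofList ((PySem.List.sorted st.1.keys (fun x => x) false).foldl
    (fun ret i => ret ++ st.1.getD i []) [])

-- ===== PORT B =====
-- B's module-level digram table _PAIR = {letter: d[j//6]+d[j%6]}; isinstance(ch, str) is the
-- `some` test
def pvPairTable : PySem.Dict Char (List Char) :=
  (PySem.List.enumerate pvAdfgvxTable 0).foldl (fun tb ji =>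
    match ji.2 with
    | some ch => tb.insert ch
        [pvDLookup (PySem.Int.floordiv ji.1 6), pvDLookup (PySem.Int.mod ji.1 6)]
    | none => tb) PySem.Dict.empty

-- `_PAIR[c] for c in text.upper() if c in _PAIR`
def pvPair (c : Char) : List Char :=
  match pvPairTable.get? c with
  | some pr => pr
  | none => []

-- B's sort key `key[p] + str(key[:p].count(key[p]))`
def pvBKey (keyL : List Char) (p : Int) : String :=
  String.ofList (PySem.List.pyGetD keyL p ' ' ::
    PySem.Int.toChars ((PySem.Chars.count (PySem.List.slice keyL none (some p))
      [PySem.List.pyGetD keyL p ' ']) : Int))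

def adfgvx_encryption_alt (text : String) (key : String) : String :=
  let pairs : List Char := (PySem.Str.upper text).toList.flatMap pvPair
  let keyL := key.toList
  let k : Int := (keyL.length : Int)
  let m : Int := min k (pairs.length : Int)
  let order := PySem.List.sorted (PySem.List.pyRange 0 m 1) (pvBKey keyL) false
  String.ofList (order.foldl
    (fun acc p => acc ++ (PySem.List.slice? pairs (some p) none k).getD []) [])

-- ===== PRECONDITION & SPEC =====
-- Pre_ excludes exactly the inputs on which A raises ZeroDivisionError (i % len(key) with an
-- empty key, reached iff the text contains at least one letter).
def Pre_adfgvx_encryption (text : String) (key : String) : Prop :=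
  key ≠ "" ∨ (PySem.Str.upper text).toList.all (fun c => ! PySem.Chars.isalpha c) = true
instance (text : String) (key : String) : Decidable (Pre_adfgvx_encryption text key) := by
  unfold Pre_adfgvx_encryption; infer_instance

def pvWitness_adfgvx_encryption : String × String := ("Attack at dawn!", "PRIVACY")

def Spec_adfgvx_encryption (text : String) (key : String) (out : String) : Prop :=
  out = adfgvx_encryption_alt text key
instance (text : String) (key : String) (out : String) : Decidable (Spec_adfgvx_encryption text key out) := by
  unfold Spec_adfgvx_encryption; infer_instance

-- ===== CLAIM (what is proved, stated in full; the proofs are below) =====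
def Claim_equal_adfgvx_encryption : Prop := ∀ (text : String) (key : String),
  Dom_adfgvx_encryption text key → Pre_adfgvx_encryption text key →
  Spec_adfgvx_encryption text key (adfgvx_encryption text key)

-- ===== LEMMAS AND PROOFS =====

-- the 26 letters of the table, in table order
def pvLetters : List Char :=
  ['N','A','C','H','T','B','O','M','E','W','R','P','D','F','G','I','J','K','L','Q','S','U','V','X','Y','Z']

-- the name A gives to column p and the contents of column p after i characters
def pvName (keyL : List Char) (p : Nat) : String :=
  String.ofList
    (keyL.getD p ' ' :: PySem.Int.toChars (((keyL.take p).count (keyL.getD p ' ') : Nat) : Int))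

def pvCol (t : List Char) (k i p : Nat) : List Char :=
  ((List.range i).filter (fun j => j % k == p)).map (fun j => t.getD j ' ')

-- decoding decimal digit strings, to show str(n) is injective on ℕ
def pvDecode (cs : List Char) : Nat := cs.foldl (fun a c => 10 * a + (c.toNat - 48)) 0

lemma pvToDigitsCore_shift : ∀ (f n : Nat) (l : List Char),
    Nat.toDigitsCore 10 f n l = Nat.toDigitsCore 10 f n [] ++ l := by
  intro f
  induction f with
  | zero => intro n l; simp [Nat.toDigitsCore]
  | succ f ih =>
    intro n l
    simp only [Nat.toDigitsCore]
    by_cases h : n / 10 = 0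
    · simp [h]
    · simp only [h, if_false]
      rw [ih (n / 10) (Nat.digitChar (n % 10) :: l), ih (n / 10) [Nat.digitChar (n % 10)]]
      simp

lemma pvDecode_append_singleton (xs : List Char) (c : Char) :
    pvDecode (xs ++ [c]) = 10 * pvDecode xs + (c.toNat - 48) := by
  simp [pvDecode, List.foldl_append]

lemma pvDecode_toDigitsCore : ∀ (n f : Nat), n < f →
    pvDecode (Nat.toDigitsCore 10 f n []) = n := by
  intro n
  induction n using Nat.strong_induction_on with
  | _ n ih =>
    intro f hf
    match f with
    | f + 1 =>
      simp only [Nat.toDigitsCore]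
      by_cases h : n / 10 = 0
      · simp only [h, if_true]
        have hn : n % 10 = n := by omega
        rw [hn]
        have h10 : n < 10 := by omega
        interval_cases n <;> rfl
      · simp only [h, if_false]
        rw [pvToDigitsCore_shift, pvDecode_append_singleton]
        rw [ih (n / 10) (by omega) f (by omega)]
        have hd : (Nat.digitChar (n % 10)).toNat - 48 = n % 10 := by
          have : n % 10 < 10 := by omega
          interval_cases h10 : (n % 10) <;> rfl
        rw [hd]
        omega

lemma pvToChars_inj (m n : Nat) (h : PySem.Int.toChars (m : Int) = PySem.Int.toChars (n : Int)) :
    m = n := by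
  have e1 : PySem.Int.toChars (m : Int) = Nat.toDigits 10 m := by
    simp [PySem.Int.toChars]
  have e2 : PySem.Int.toChars (n : Int) = Nat.toDigits 10 n := by
    simp [PySem.Int.toChars]
  rw [e1, e2] at h
  have := congrArg pvDecode h
  rwa [Nat.toDigits, Nat.toDigits, pvDecode_toDigitsCore m (m + 1) (by omega),
    pvDecode_toDigitsCore n (n + 1) (by omega)] at this

lemma pvName_ne (keyL : List Char) (p q : Nat) (hpq : p < q) (hq : q < keyL.length) :
    pvName keyL p ≠ pvName keyL q := by
  intro h0
  unfold pvName at h0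
  have h := congrArg String.toList h0
  rw [String.toList_ofList, String.toList_ofList, List.cons.injEq] at h
  obtain ⟨h1, h2⟩ := h
  rw [h1] at h2
  have hplen : p < keyL.length := lt_trans hpq hq
  -- position p holds the character keyL.getD q ' ', which so occurs strictly more often in keyL.take q
  have hcnt : (keyL.take p).count (keyL.getD q ' ') < (keyL.take q).count (keyL.getD q ' ') := by
    have hsucc : keyL.take (p + 1) = keyL.take p ++ [keyL.getD q ' '] := by
      rw [List.take_add_one]
      have : keyL[p]? = some (keyL.getD q ' ') := by
        rw [List.getElem?_eq_getElem hplen]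
        rw [← h1, List.getD_eq_getElem keyL ' ' hplen]
      rw [this, Option.toList_some]
    have hpre : keyL.take (p + 1) <+: keyL.take q := by
      have := List.take_prefix (p + 1) (keyL.take q)
      rwa [List.take_take, min_eq_left (by omega)] at this
    have hle : (keyL.take (p + 1)).count (keyL.getD q ' ') ≤ (keyL.take q).count (keyL.getD q ' ') :=
      hpre.sublist.count_le (keyL.getD q ' ')
    rw [hsucc, List.count_append] at hle
    have h1c : List.count (keyL.getD q ' ') [keyL.getD q ' '] = 1 := by simp
    omega
  have := pvToChars_inj _ _ h2
  omega

lemma pvName_nodup (keyL : List Char) (m : Nat) (hm : m ≤ keyL.length) :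
    ((List.range m).map (pvName keyL)).Nodup := by
  have h1 : (List.range m).Pairwise (fun p q => pvName keyL p ≠ pvName keyL q) := by
    refine List.Pairwise.imp_of_mem ?_ (List.pairwise_lt_range)
    intro a b ha hb hlt
    exact pvName_ne keyL a b hlt (lt_of_lt_of_le (List.mem_range.mp hb) hm)
  show ((List.range m).map (pvName keyL)).Pairwise (· ≠ ·)
  rw [List.pairwise_map]
  exact h1

-- substitution: A's inner scan of the table equals B's digram-table lookup
set_option maxRecDepth 8000 in
lemma pvPairTable_keys : pvPairTable.keys = pvLetters := by rfl

lemma pvTable_shape : ∀ o ∈ pvAdfgvxTable, o = none ∨ ∃ x ∈ pvLetters, o = some x := by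
  intro o ho
  simp only [pvAdfgvxTable, List.mem_cons, List.not_mem_nil, or_false] at ho
  rcases ho with rfl|rfl|rfl|rfl|rfl|rfl|rfl|rfl|rfl|rfl|rfl|rfl|rfl|rfl|rfl|rfl|rfl|rfl|rfl|rfl|rfl|rfl|rfl|rfl|rfl|rfl|rfl|rfl|rfl|rfl|rfl|rfl|rfl|rfl|rfl|rfl <;>
    first
      | (left; rfl)
      | (right; exact ⟨_, by decide, rfl⟩)

lemma pvLetters_alpha : ∀ x ∈ pvLetters, PySem.Chars.isalpha x = true := by
  intro x hx
  simp only [pvLetters, List.mem_cons, List.not_mem_nil, or_false] at hx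
  rcases hx with rfl|rfl|rfl|rfl|rfl|rfl|rfl|rfl|rfl|rfl|rfl|rfl|rfl|rfl|rfl|rfl|rfl|rfl|rfl|rfl|rfl|rfl|rfl|rfl|rfl|rfl <;> rfl

set_option maxRecDepth 8000 in
lemma pvA1_eq (acc : List Char) (c : Char) : pvA1 acc c = acc ++ pvPair c := by
  by_cases hc : c ∈ pvLetters
  · simp only [pvLetters, List.mem_cons, List.not_mem_nil, or_false] at hc
    rcases hc with rfl|rfl|rfl|rfl|rfl|rfl|rfl|rfl|rfl|rfl|rfl|rfl|rfl|rfl|rfl|rfl|rfl|rfl|rfl|rfl|rfl|rfl|rfl|rfl|rfl|rfl <;> rfl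
  · have hnone : pvPairTable.get? c = none := by
      rw [PySem.Dict.get?_eq_none_iff_not_mem_keys]
      rw [pvPairTable_keys]; exact hc
    have hfalse : ∀ ji ∈ PySem.List.enumerate pvAdfgvxTable 0, (some c == ji.2) = false := by
      intro ji hji
      have h2 : ji.2 ∈ pvAdfgvxTable := by
        have := List.mem_map_of_mem (f := fun q : Int × Option Char => q.2) hji
        rwa [PySem.List.map_snd_enumerate] at this
      rcases pvTable_shape _ h2 with h | ⟨x, hx, h⟩
      · simp only [h]; rfl
      · simp only [h]
        exact beq_eq_false_iff_ne.mpr (by simp; exact fun e => hc (e ▸ hx))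
    have hkeep : ∀ (l : List (Int × Option Char)) (acc : List Char),
        (∀ x ∈ l, (some c == x.2) = false) →
        l.foldl (fun t ji =>
          if some c == ji.2 then
            t ++ [pvDLookup (PySem.Int.floordiv ji.1 6), pvDLookup (PySem.Int.mod ji.1 6)]
          else t) acc = acc := by
      intro l
      induction l with
      | nil => intro acc _; rfl
      | cons x xs ihl =>
        intro acc hall
        rw [List.foldl_cons, hall x (by simp)]
        exact ihl acc (fun y hy => hall y (by simp [hy]))
    unfold pvA1
    rw [hkeep _ acc hfalse]
    unfold pvPair
    rw [hnone]
    simp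

lemma pvA1_flatMap : ∀ (cs : List Char) (acc : List Char),
    cs.foldl pvA1 acc = acc ++ cs.flatMap pvPair := by
  intro cs
  induction cs with
  | nil => intro acc; simp
  | cons c cs ih =>
    intro acc
    rw [List.foldl_cons, pvA1_eq, ih, List.flatMap_cons, List.append_assoc]

lemma pvPair_not_alpha (c : Char) (h : PySem.Chars.isalpha c = false) : pvPair c = [] := by
  unfold pvPair
  cases h2 : pvPairTable.get? c with
  | none => rfl
  | some j =>
    exfalso
    have hmem : c ∈ pvPairTable.keys := by
      by_contra hnc
      rw [← PySem.Dict.get?_eq_none_iff_not_mem_keys] at hnc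
      rw [hnc] at h2; cases h2
    rw [pvPairTable_keys] at hmem
    rw [pvLetters_alpha c hmem] at h; cases h

-- counting the multiples of k below i (A's `check`)
lemma pvCountMul (k : Nat) (_hk : 0 < k) : ∀ i, i ≤ k →
    (List.range i).countP (fun j => decide (j % k = 0)) = if i = 0 then 0 else 1 := by
  intro i
  induction i with
  | zero => intro _; rfl
  | succ i ih =>
    intro hik
    rw [List.range_succ, List.countP_append]
    by_cases h0 : i = 0
    · subst h0; simp
    · have hmod : i % k = i := Nat.mod_eq_of_lt (by omega)
      have : (List.countP (fun j => decide (j % k = 0)) [i]) = 0 := by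
        simp [hmod, h0]
      rw [this, ih (by omega)]
      simp [h0]

lemma pvCountMul_ge (k i : Nat) (hk : 0 < k) (hik : k ≤ i) :
    2 ≤ (List.range (i + 1)).countP (fun j => decide (j % k = 0)) := by
  have h1 : (List.range (k + 1)).countP (fun j => decide (j % k = 0)) = 2 := by
    rw [List.range_succ, List.countP_append, pvCountMul k hk k le_rfl]
    simp [Nat.mod_self, hk.ne']
  calc 2 = (List.range (k + 1)).countP (fun j => decide (j % k = 0)) := h1.symm
    _ ≤ (List.range (i + 1)).countP (fun j => decide (j % k = 0)) :=
        (List.range_sublist.mpr (by omega)).countP_le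

-- pvCol evolution
lemma pvCol_succ_ne (t : List Char) (k i p : Nat) (h : i % k ≠ p) :
    pvCol t k (i + 1) p = pvCol t k i p := by
  unfold pvCol
  rw [List.range_succ, List.filter_append]
  have : (List.filter (fun j => j % k == p) [i]) = [] := by
    simp [h]
  rw [this, List.append_nil]

lemma pvCol_succ_eq (t : List Char) (k i p : Nat) (h : i % k = p) :
    pvCol t k (i + 1) p = pvCol t k i p ++ [t.getD i ' '] := by
  unfold pvCol
  rw [List.range_succ, List.filter_append]
  have : (List.filter (fun j => j % k == p) [i]) = [i] := by
    simp [h]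
  rw [this, List.map_append]
  rfl

lemma pvCol_eq_nil (t : List Char) (k i p : Nat) (h : ∀ j < i, j % k ≠ p) :
    pvCol t k i p = [] := by
  unfold pvCol
  have : (List.filter (fun j => j % k == p) (List.range i)) = [] := by
    rw [List.filter_eq_nil_iff]
    intro j hj
    simp only [beq_iff_eq]
    exact h j (List.mem_range.mp hj)
  rw [this, List.map_nil]

lemma pvStartswith_singleton (x c : Char) (xs : List Char) :
    PySem.Chars.startswith (x :: xs) [c] = (c == x) := by
  by_cases h : c = x
  · subst h
    rw [beq_self_eq_true]
    exact (PySem.Chars.startswith_iff _ _).mpr ⟨xs, rfl⟩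
  · rw [beq_eq_false_iff_ne.mpr h]
    rw [← Bool.not_eq_true, PySem.Chars.startswith_iff]
    intro hp
    rw [List.cons_prefix_cons] at hp
    exact h hp.1

lemma pvStartswith_name (keyL : List Char) (p : Nat) (c : Char) :
    PySem.Str.startswith (pvName keyL p) (String.ofList [c]) = (c == keyL.getD p ' ') := by
  unfold pvName
  rw [PySem.Str.startswith_eq, String.toList_ofList, String.toList_ofList]
  exact pvStartswith_singleton _ _ _

lemma pvCount_take (keyL : List Char) (c : Char) : ∀ i, i ≤ keyL.length →
    (List.range i).countP (fun p => c == keyL.getD p ' ') = List.count c (keyL.take i) := by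
  intro i
  induction i with
  | zero => intro _; rfl
  | succ i ih =>
    intro hi
    have hlt : i < keyL.length := by omega
    rw [List.range_succ, List.countP_append, ih (by omega)]
    have htake : keyL.take (i + 1) = keyL.take i ++ [keyL.getD i ' '] := by
      have hg : keyL[i]? = some (keyL.getD i ' ') := by
        rw [List.getElem?_eq_getElem hlt, List.getD_eq_getElem keyL ' ' hlt]
      rw [List.take_add_one, hg, Option.toList_some]
    rw [htake, List.count_append]
    congr 1
    by_cases h : c = keyL.getD i ' '
    · rw [h]; simp
    · have hx : c ≠ keyL[i]?.getD ' ' := by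
        rw [← List.getD_eq_getElem?_getD]
        exact h
      simp [hx, Ne.symm hx]

lemma pvEnumTake (t : List Char) (i : Nat) (hlt : i < t.length) :
    PySem.List.enumerate (t.take (i + 1)) 0
      = PySem.List.enumerate (t.take i) 0 ++ [((i : Int), t[i])] := by
  have hg : t[i]? = some t[i] := List.getElem?_eq_getElem hlt
  rw [List.take_add_one, hg, Option.toList_some, PySem.List.enumerate_append]
  congr 1
  rw [PySem.List.enumerate_cons, PySem.List.enumerate_nil]
  simp [List.length_take, min_eq_left (le_of_lt hlt)]

lemma pvA2_step (keyL t : List Char) (hk : 0 < keyL.length) (i : Nat) (hi : i < t.length)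
    (st : PySem.Dict String (List Char) × Int)
    (hitems : st.1.items = (List.range (min i keyL.length)).map
      (fun p => (pvName keyL p, pvCol t keyL.length i p)))
    (hcheck : st.2 = ((List.range i).countP (fun j => decide (j % keyL.length = 0)) : Int) - 1) :
    (pvA2 keyL st ((i : Int), t[i])).1.items
      = (List.range (min (i + 1) keyL.length)).map
          (fun p => (pvName keyL p, pvCol t keyL.length (i + 1) p))
    ∧ (pvA2 keyL st ((i : Int), t[i])).2
      = ((List.range (i + 1)).countP (fun j => decide (j % keyL.length = 0)) : Int) - 1 := by
  have hmlt : i % keyL.length < keyL.length := Nat.mod_lt _ hk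
  unfold pvA2
  simp only [PySem.Int.mod_natCast, PySem.List.pyGetD_natCast]
  have hcheck' : (if ((((i % keyL.length : Nat)) : Int) == 0) = true then st.2 + 1 else st.2)
      = ((List.range (i + 1)).countP (fun j => decide (j % keyL.length = 0)) : Int) - 1 := by
    by_cases h0 : i % keyL.length = 0
    · rw [if_pos (by simp [h0]), hcheck, List.range_succ, List.countP_append]
      have h1 : List.countP (fun j => decide (j % keyL.length = 0)) [i] = 1 := by simp [h0]
      rw [h1]; push_cast; ring
    · have hb : ((((i % keyL.length : Nat)) : Int) == 0) = false :=
        beq_eq_false_iff_ne.mpr (by exact_mod_cast h0)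
      rw [if_neg (by rw [hb]; exact Bool.false_ne_true), hcheck,
        List.range_succ, List.countP_append]
      have h1 : List.countP (fun j => decide (j % keyL.length = 0)) [i] = 0 := by simp [h0]
      rw [h1]; push_cast; ring
  rw [hcheck']
  by_cases hik : i < keyL.length
  · -- first pass over the key: a fresh column is created
    have hmodi : i % keyL.length = i := Nat.mod_eq_of_lt hik
    rw [hmodi]
    have hval : ((List.range (i + 1)).countP (fun j => decide (j % keyL.length = 0)) : Int) - 1
        = 0 := by
      rw [pvCountMul keyL.length hk (i + 1) (by omega)]
      simp
    rw [hval]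
    rw [if_pos (show ((0 : Int) == 0) = true from rfl)]
    have hkeys : st.1.keys = (List.range i).map (pvName keyL) := by
      simp only [PySem.Dict.keys]
      rw [hitems, min_eq_left hik.le, List.map_map]
      rfl
    rw [hkeys]
    rw [PySem.List.foldl_count_if
      (fun j => PySem.Str.startswith j (String.ofList [keyL.getD i ' ']))
      ((List.range i).map (pvName keyL)) (-1)]
    rw [List.countP_map]
    have hcp : List.countP
        ((fun j => PySem.Str.startswith j (String.ofList [keyL.getD i ' '])) ∘ pvName keyL)
        (List.range i)
        = List.countP (fun p => keyL.getD i ' ' == keyL.getD p ' ') (List.range i) := by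
      apply List.countP_congr
      intro p _
      simp only [Function.comp_apply]
      rw [pvStartswith_name keyL p (keyL.getD i ' ')]
    rw [hcp, pvCount_take keyL (keyL.getD i ' ') i hik.le]
    have harith : (-1 : Int) + (List.count (keyL.getD i ' ') (List.take i keyL) : Int) + 1
        = ((List.count (keyL.getD i ' ') (List.take i keyL) : Nat) : Int) := by ring
    rw [harith]
    have hname : String.ofList (keyL.getD i ' '
        :: PySem.Int.toChars ((List.count (keyL.getD i ' ') (List.take i keyL) : Nat) : Int))
        = pvName keyL i := rfl
    rw [hname]
    have hcont : st.1.contains (pvName keyL i) = false := by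
      rw [PySem.Dict.contains_eq_decide_mem_keys, hkeys]
      apply decide_eq_false
      intro hmem
      rcases List.mem_map.mp hmem with ⟨p, hp, he⟩
      exact pvName_ne keyL p i (List.mem_range.mp hp) hik he
    rw [hcont, if_neg Bool.false_ne_true]
    rw [PySem.Dict.items_insert_of_not_contains st.1 _ hcont]
    rw [hitems, min_eq_left hik.le]
    refine ⟨?_, rfl⟩
    rw [min_eq_left (by omega), List.range_succ, List.map_append]
    congr 1
    · apply List.map_congr_left
      intro p hp
      rw [pvCol_succ_ne t keyL.length i p (by rw [hmodi]; exact (List.mem_range.mp hp).ne')]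
    · have hnil : pvCol t keyL.length i i = [] := by
        apply pvCol_eq_nil
        intro j hj
        rw [Nat.mod_eq_of_lt (lt_trans hj hik)]
        omega
      simp only [List.map_cons, List.map_nil]
      rw [pvCol_succ_eq t keyL.length i i hmodi, hnil, List.nil_append,
        List.getD_eq_getElem t ' ' hi]
  · -- later passes: the character is appended to column i % len(key)
    have hkle : keyL.length ≤ i := le_of_not_gt hik
    have h2le := pvCountMul_ge keyL.length i hk hkle
    have hne : ((((List.range (i + 1)).countP (fun j => decide (j % keyL.length = 0)) : Int) - 1)
        == 0) = false := by
      apply beq_eq_false_iff_ne.mpr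
      intro he
      omega
    rw [hne, if_neg Bool.false_ne_true]
    have hkeys : st.1.keys = (List.range keyL.length).map (pvName keyL) := by
      simp only [PySem.Dict.keys]
      rw [hitems, min_eq_right hkle, List.map_map]
      rfl
    rw [hkeys]
    rw [PySem.List.getD_map_range (pvName keyL) keyL.length (i % keyL.length) "" hmlt]
    have hnodup : st.1.keys.Nodup := by
      rw [hkeys]; exact pvName_nodup keyL keyL.length le_rfl
    have hmem : (pvName keyL (i % keyL.length), pvCol t keyL.length i (i % keyL.length))
        ∈ st.1.items := by
      rw [hitems, min_eq_right hkle]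
      exact List.mem_map_of_mem (List.mem_range.mpr hmlt)
    rw [PySem.Dict.getD_of_mem_items st.1 hmem hnodup []]
    have hcont : st.1.contains (pvName keyL (i % keyL.length)) = true := by
      rw [PySem.Dict.contains_eq_decide_mem_keys, hkeys]
      exact decide_eq_true (List.mem_map_of_mem (List.mem_range.mpr hmlt))
    rw [PySem.Dict.items_insert_of_contains st.1 _ hcont]
    rw [hitems, min_eq_right hkle, min_eq_right (by omega), List.map_map]
    refine ⟨?_, rfl⟩
    apply List.map_congr_left
    intro p hp
    have hpk : p < keyL.length := List.mem_range.mp hp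
    simp only [Function.comp_apply]
    by_cases hpq : p = i % keyL.length
    · subst hpq
      rw [if_pos (by rw [beq_self_eq_true])]
      rw [pvCol_succ_eq t keyL.length i (i % keyL.length) rfl,
        List.getD_eq_getElem t ' ' hi]
    · have hb : (pvName keyL p == pvName keyL (i % keyL.length)) = false := by
        apply beq_eq_false_iff_ne.mpr
        rcases Nat.lt_or_ge p (i % keyL.length) with hlt | hge
        · exact pvName_ne keyL p _ hlt hmlt
        · exact (pvName_ne keyL (i % keyL.length) p (by omega) hpk).symm
      rw [if_neg (by rw [hb]; exact Bool.false_ne_true)]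
      rw [pvCol_succ_ne t keyL.length i p (fun e => hpq e.symm)]

-- A's second loop: invariant
lemma pvLoop2_inv (keyL t : List Char) (hk : 0 < keyL.length) : ∀ i, i ≤ t.length →
    ((PySem.List.enumerate (t.take i) 0).foldl (pvA2 keyL) (PySem.Dict.empty, -1)).1.items
      = (List.range (min i keyL.length)).map
          (fun p => (pvName keyL p, pvCol t keyL.length i p))
    ∧ ((PySem.List.enumerate (t.take i) 0).foldl (pvA2 keyL) (PySem.Dict.empty, -1)).2
      = ((List.range i).countP (fun j => decide (j % keyL.length = 0)) : Int) - 1 := by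
  intro i
  induction i with
  | zero => intro _; exact ⟨rfl, by simp⟩
  | succ i ih =>
    intro hi
    obtain ⟨h1, h2⟩ := ih (by omega)
    rw [pvEnumTake t i (by omega), List.foldl_append, List.foldl_cons, List.foldl_nil]
    exact pvA2_step keyL t hk i (by omega) _ h1 h2

-- B's sort key at an in-range natural index is exactly A's column name
lemma pvCountGo_singleton (c : Char) : ∀ (fuel : Nat) (l : List Char) (acc : Nat),
    l.length ≤ fuel → PySem.Chars.count.go [c] fuel l acc = acc + l.count c := by
  intro fuel
  induction fuel with
  | zero =>
    intro l acc hl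
    have : l = [] := List.eq_nil_of_length_eq_zero (by omega)
    subst this
    simp [PySem.Chars.count.go]
  | succ fuel ih =>
    intro l acc hl
    cases l with
    | nil => simp [PySem.Chars.count.go]
    | cons h t =>
      have hpre : List.isPrefixOf [c] (h :: t) = (c == h) := by
        simp [List.isPrefixOf]
      simp only [PySem.Chars.count.go, hpre]
      by_cases hch : c = h
      · rw [if_pos (by simp [hch])]
        have hdrop : List.drop ([c].length) (h :: t) = t := rfl
        rw [hdrop, ih t (acc + 1) (by simpa using Nat.lt_succ_iff.mp (by simpa using hl))]
        rw [List.count_cons]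
        simp [hch]
        omega
      · rw [if_neg (by simp [hch])]
        rw [ih t acc (by simpa using Nat.lt_succ_iff.mp (by simpa using hl))]
        have hch' : (c == h) = false := beq_eq_false_iff_ne.mpr hch
        simp [List.count_cons]
        exact fun e => hch e.symm
  
lemma pvCount_singleton (l : List Char) (c : Char) :
    PySem.Chars.count l [c] = l.count c := by
  unfold PySem.Chars.count
  rw [if_neg (by simp)]
  rw [pvCountGo_singleton c l.length l 0 le_rfl]
  exact Nat.zero_add _

lemma pvBKey_eq (keyL : List Char) (q : Nat) (_hq : q < keyL.length) :
    pvBKey keyL (q : Int) = pvName keyL q := by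
  unfold pvBKey pvName
  rw [PySem.List.pyGetD_natCast, PySem.List.slice_to_natCast, pvCount_singleton]

-- q-th strided position is in range iff q is below the ceiling count
lemma pvStrideCnt_iff (k n p q : Nat) (hk : 0 < k) (hpn : p < n) :
    q < (n - p + k - 1) / k ↔ p + k * q < n := by
  have hmul : (q + 1) * k = k * q + k := by ring
  constructor
  · intro h
    have h2 : (q + 1) * k ≤ n - p + k - 1 := (Nat.le_div_iff_mul_le hk).mp h
    omega
  · intro h
    have h1 : (q + 1) * k ≤ n - p + k - 1 := by omega
    have := (Nat.le_div_iff_mul_le hk).mpr h1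
    omega

-- the strided positions p, p+k, p+2k, … below n, as a filtered range
lemma pvStride_indices (k n p : Nat) (hk : 0 < k) (hpk : p < k) (hpn : p < n) :
    (List.range n).filter (fun j => j % k == p)
      = (List.range ((n - p + k - 1) / k)).map (fun q => p + k * q) := by
  set cnt := (n - p + k - 1) / k with hcnt
  have hqiff : ∀ q : Nat, q < cnt ↔ p + k * q < n := fun q =>
    pvStrideCnt_iff k n p q hk hpn
  have hnodup1 : ((List.range n).filter (fun j => j % k == p)).Nodup :=
    (List.nodup_range).filter _
  have hnodup2 : ((List.range cnt).map (fun q => p + k * q)).Nodup := by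
    rw [List.nodup_map_iff_inj_on List.nodup_range]
    intro a _ b _ h
    have h2 : k * a = k * b := by omega
    exact Nat.eq_of_mul_eq_mul_left hk h2
  have hmem : ∀ j, j ∈ (List.range n).filter (fun j => j % k == p)
      ↔ j ∈ (List.range cnt).map (fun q => p + k * q) := by
    intro j
    rw [List.mem_filter, List.mem_range, List.mem_map]
    constructor
    · rintro ⟨hjn, hjp⟩
      have hjp' : j % k = p := by simpa using hjp
      refine ⟨j / k, ?_, ?_⟩
      · rw [List.mem_range, hqiff]
        have : k * (j / k) + j % k = j := Nat.div_add_mod j k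
        omega
      · have : k * (j / k) + j % k = j := Nat.div_add_mod j k
        omega
    · rintro ⟨q, hq, rfl⟩
      rw [List.mem_range, hqiff] at hq
      refine ⟨hq, ?_⟩
      simp [Nat.add_mul_mod_self_left, Nat.mod_eq_of_lt hpk]
  have hperm : ((List.range n).filter (fun j => j % k == p)).Perm
      ((List.range cnt).map (fun q => p + k * q)) := by
    apply List.perm_of_nodup_nodup_toFinset_eq hnodup1 hnodup2
    apply Finset.ext
    intro j
    rw [List.mem_toFinset, List.mem_toFinset]
    exact hmem j
  have hs1 : ((List.range n).filter (fun j => j % k == p)).Pairwise (· ≤ ·) :=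
    ((List.pairwise_lt_range).sublist List.filter_sublist).imp le_of_lt
  have hs2 : ((List.range cnt).map (fun q => p + k * q)).Pairwise (· ≤ ·) := by
    rw [List.pairwise_map]
    refine (List.pairwise_lt_range).imp ?_
    intro a b h
    have := Nat.mul_le_mul_left k h.le
    omega
  exact List.Perm.eq_of_pairwise (fun a b _ _ h1 h2 => Nat.le_antisymm h1 h2) hs1 hs2 hperm

-- B's strided slice pairs[p::k] is exactly A's column p
lemma pvSlice_eq_col (t : List Char) (k p : Nat) (hk : 0 < k) (hpk : p < k)
    (hpn : p < t.length) :
    (PySem.List.slice? t (some (p : Int)) none (k : Int)).getD []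
      = pvCol t k t.length p := by
  have hkz : ((k : Int) = 0) = False := by simp; omega
  have hstep : ¬ ((k : Int) < 0) := by omega
  have hcnt : (if (0 : Int) < (k : Int) then
        if (p : Int) < (t.length : Int) then
          (((t.length : Int) - (p : Int) + (k : Int) - 1) / (k : Int)).toNat else 0
      else if (t.length : Int) < (p : Int) then
          (((p : Int) - (t.length : Int) + -(k : Int) - 1) / -(k : Int)).toNat else 0)
      = (t.length - p + k - 1) / k := by
    rw [if_pos (by exact_mod_cast hk), if_pos (by exact_mod_cast hpn)]
    have he : ((t.length : Int) - (p : Int) + (k : Int) - 1)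
        = ((t.length - p + k - 1 : Nat) : Int) := by omega
    rw [he, ← Int.natCast_ediv, Int.toNat_natCast]
  have hidx : PySem.List.sliceIndices t.length (some (p : Int)) none (k : Int)
      = ((p : Int), (t.length : Int), (k : Int)) := by
    simp only [PySem.List.sliceIndices]
    rw [if_neg hstep, if_neg hstep, if_neg (by omega), if_neg hstep]
    rw [min_eq_left (by exact_mod_cast hpn.le)]
  simp only [PySem.List.slice?, hidx]
  rw [if_neg (by simp; omega)]
  rw [hcnt]
  rw [Option.getD_some]
  have hcol : pvCol t k t.length p
      = (List.range ((t.length - p + k - 1) / k)).map (fun q => t.getD (p + k * q) ' ') := by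
    unfold pvCol
    rw [pvStride_indices k t.length p hk hpk hpn, List.map_map]
    rfl
  rw [hcol]
  have hin : ∀ q ∈ List.range ((t.length - p + k - 1) / k),
      t[((p : Int) + (k : Int) * (q : Int)).toNat]? = some (t.getD (p + k * q) ' ') := by
    intro q hq
    rw [List.mem_range, pvStrideCnt_iff k t.length p q hk hpn] at hq
    have htn : ((p : Int) + (k : Int) * (q : Int)).toNat = p + k * q := by omega
    rw [htn, List.getElem?_eq_getElem hq, List.getD_eq_getElem t ' ' hq]
  rw [List.filterMap_congr hin]
  rw [show (fun q : Nat => some (t.getD (p + k * q) ' '))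
      = some ∘ (fun q : Nat => t.getD (p + k * q) ' ') from rfl]
  rw [List.filterMap_eq_map]

-- column p of the pair stream together with its name (the sort item B's index q stands for)
def pvG (keyL t : List Char) (p : Int) : String × List Char :=
  (pvName keyL p.toNat, pvCol t keyL.length t.length p.toNat)

-- ===== VERDICT (by name: the statement is the Claim_ definition above) =====
theorem adfgvx_encryption_spec : Claim_equal_adfgvx_encryption := by
  intro text key hdom hpre
  show adfgvx_encryption text key = adfgvx_encryption_alt text key
  simp only [adfgvx_encryption, adfgvx_encryption_alt]
  rw [pvA1_flatMap, List.nil_append]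
  by_cases hnil : (PySem.Str.upper text).toList.flatMap pvPair = []
  · rw [hnil]
    have h0 : min ((key.toList.length : Int)) ((([] : List Char).length : Int)) = 0 := by
      simp
    rw [h0, PySem.List.pyRange_one_eq_nil le_rfl]
    rfl
  · set t : List Char := (PySem.Str.upper text).toList.flatMap pvPair with ht
    have hkey : key.toList ≠ [] := by
      rcases hpre with h | h
      · exact fun he => h (String.toList_eq_nil_iff.mp he)
      · exfalso
        apply hnil
        apply List.flatMap_eq_nil_iff.mpr
        intro c hc
        apply pvPair_not_alpha
        rw [List.all_eq_true] at h
        simpa using h c hc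
    have hk : 0 < key.toList.length := List.length_pos_of_ne_nil hkey
    -- A's second loop, fully run
    obtain ⟨hitems, -⟩ := pvLoop2_inv key.toList t hk t.length le_rfl
    rw [List.take_length, Nat.min_comm] at hitems
    set mN := min key.toList.length t.length with hmN
    set st := (PySem.List.enumerate t 0).foldl (pvA2 key.toList) (PySem.Dict.empty, -1) with hst
    set PL := (List.range mN).map
      (fun p => (pvName key.toList p, pvCol t key.toList.length t.length p)) with hPL
    have hfst : PL.map Prod.fst = (List.range mN).map (pvName key.toList) := by
      rw [hPL, List.map_map]
      rfl
    have hnodupN : ((List.range mN).map (pvName key.toList)).Nodup :=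
      pvName_nodup _ _ (min_le_left _ _)
    have hkeysPL : st.1.keys = PL.map Prod.fst := by
      simp only [PySem.Dict.keys]
      rw [hitems]
    -- B's index list and its sorted order
    rw [← Nat.cast_min, ← hmN, PySem.List.pyRange_zero_natCast]
    set order := PySem.List.sorted ((List.range mN).map (fun q : Nat => (q : Int)))
      (pvBKey key.toList) false with horder
    have hmemO : ∀ p ∈ order, ∃ q : Nat, q < mN ∧ p = (q : Int) := by
      intro p hp
      rw [horder, PySem.List.mem_sorted] at hp
      rcases List.mem_map.mp hp with ⟨q, hq, rfl⟩
      exact ⟨q, List.mem_range.mp hq, rfl⟩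
    -- B's sorted index list names exactly A's sorted column list
    set S := PySem.List.sorted PL (fun x => x.1) false with hS
    have hSorder : S = order.map (pvG key.toList t) := by
      rw [hS]
      apply PySem.List.sorted_eq_of_perm_of_pairwise_lt
      · have h1 : order.Perm ((List.range mN).map (fun q : Nat => (q : Int))) :=
          PySem.List.sorted_perm _ _ _
        have h2 : ((List.range mN).map (fun q : Nat => (q : Int))).map (pvG key.toList t)
            = PL := by
          rw [List.map_map, hPL]
          apply List.map_congr_left
          intro q _
          simp [pvG]
        rw [← h2]
        exact h1.map _
      · rw [List.pairwise_map]
        have hle : order.Pairwise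
            (fun a b => pvBKey key.toList a ≤ pvBKey key.toList b) :=
          PySem.List.sorted_pairwise _ _
        have hnd : order.Nodup := by
          refine (PySem.List.sorted_perm _ _ _).nodup_iff.mpr ?_
          refine List.Nodup.map ?_ List.nodup_range
          intro a b h
          simpa using h
        refine List.Pairwise.imp_of_mem ?_ (hle.and hnd)
        intro a b ha hb hab
        obtain ⟨qa, hqa, rfl⟩ := hmemO a ha
        obtain ⟨qb, hqb, rfl⟩ := hmemO b hb
        have hka : qa < key.toList.length := lt_of_lt_of_le hqa (min_le_left _ _)
        have hkb : qb < key.toList.length := lt_of_lt_of_le hqb (min_le_left _ _)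
        rw [pvBKey_eq key.toList qa hka, pvBKey_eq key.toList qb hkb] at hab
        have hne : qa ≠ qb := fun e => hab.2 (by rw [e])
        show (pvG key.toList t (qa : Int)).1 < (pvG key.toList t (qb : Int)).1
        simp only [pvG, Int.toNat_natCast]
        refine lt_of_le_of_ne hab.1 ?_
        rcases lt_or_gt_of_ne hne with hlt | hgt
        · exact pvName_ne key.toList qa qb hlt hkb
        · exact (pvName_ne key.toList qb qa hgt hka).symm
    -- A's final loop over sorted keys = fold over S
    have hsortedkeys : PySem.List.sorted st.1.keys (fun x => x) false
        = S.map (fun x => x.1) := by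
      apply PySem.List.sorted_eq_of_perm_of_pairwise_lt
      · rw [hkeysPL]
        exact (PySem.List.sorted_perm PL (fun x => x.1) false).map _
      · have hle := PySem.List.sorted_map_key_pairwise PL (fun x => x.1)
        have hnd : (S.map (fun x => x.1)).Nodup := by
          have hperm : (S.map (fun x => x.1)).Perm
              ((List.range mN).map (pvName key.toList)) := by
            rw [← hfst]
            exact (PySem.List.sorted_perm PL (fun x => x.1) false).map _
          exact hperm.nodup_iff.mpr hnodupN
        exact (hle.and hnd).imp (fun hab => lt_of_le_of_ne hab.1 hab.2)
    have hnodupK : st.1.keys.Nodup := by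
      rw [hkeysPL, hfst]
      exact hnodupN
    rw [hsortedkeys, List.foldl_map]
    have hA : S.foldl (fun acc pr => acc ++ st.1.getD pr.1 []) []
        = S.foldl (fun acc pr => acc ++ pr.2) [] := by
      apply PySem.List.foldl_congr_mem
      intro acc pr hpr
      have hmemPL : pr ∈ PL := (PySem.List.sorted_perm PL (fun x => x.1) false).mem_iff.mp hpr
      obtain ⟨pr1, pr2⟩ := pr
      rw [PySem.Dict.getD_of_mem_items st.1 (by rw [hitems]; exact hmemPL) hnodupK []]
    rw [hA, hSorder, List.foldl_map]
    refine congrArg String.ofList ?_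
    apply PySem.List.foldl_congr_mem
    intro acc p hp
    obtain ⟨q, hq, rfl⟩ := hmemO p hp
    have hcol := pvSlice_eq_col t key.toList.length q hk
      (lt_of_lt_of_le hq (min_le_left _ _)) (lt_of_lt_of_le hq (min_le_right _ _))
    rw [hcol]
    simp [pvG]
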